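-- pv_equiv track=rewrite | github.com/b4rt4s/Simulation-of-Processor-Time-Scheduling-Algorithms | create_times.py | create_list_of_times
-- ===== SOURCE A (Python) =====
-- def create_list_of_times(list_of_data):
--     # Przypisujemy do zmiennej "test_data" nasze dane testowe,
--     # które zostały posortowane w pliku "algorithm_fcfs.py" lub
--     # "algorithm_sjf.py".
--     test_data = list_of_data
--
--     # Tworzymy listę czasów wyjścia procesów, czyli czasów,
--     # w których proces opuszcza procesor po całkowitym jego wykonaniu.
--     exit_time = []
--
--     # Tworzymy listę czasów cykli przetwarzania procesów,
--     # czyli czasów różnicy między czasem wyjścia procesu i czasem jego przybycia.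
--     turn_around_time = []
--
--     # Tworzymy listę czasów oczekiwania procesów.
--     waiting_time = []
--
--     # Tworzymy listę składająca się z 5 indeksów:
--     # 1. indeks: czasy przybycia procesów,
--     # 2. indeks: czasy wykonywania procesów,
--     # 3. indeks: czasy wyjścia procesów,
--     # 4. indeks: czasy cykli przetwarzania procesów,
--     # 5. indeks: czasy oczekiwania procesów.
--     times = []
--
--     # W pętli for przemieszczamy się po liście składającej się
--     # z zagnieżdżonych list, których elementami są
--     # czasy przybycia i wykonywania procesów.
--     for element in range(len(test_data)):
--
--         # Dodawanie czasów wyjścia procesów do listy.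
--         if element == 0:
--
--             # Pierwszy czas wyjścia jest równy sumie czasu przybycia i czasu wykonywania procesu.
--             # Proces ten musi mieć najniższy czas przybycia ze wszystkich procesów.
--             exit_time.append(test_data[element][0] + test_data[element][1])
--         else:
--
--             # Pozostałe czasy są równe sumie czasu wyjścia bieżącego procesu
--             # i czasu wykonywania procesu, który był następny w kolejce.
--             exit_time.append(exit_time[element - 1] + test_data[element][1])
--
--         # Dodawanie czasów cykli przetwarzania procesów do listy.
--         # Jest to różnica czasu wyjścia procesu i czasu przybycia procesu.
--         turn_around_time.append(exit_time[element] - test_data[element][0])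
--
--         # Dodawanie czasów oczekiwania procesów do listy.
--         if element == 0:
--
--             # Pierwszy czas oczekiwania jest zawsze równy zero, ponieważ
--             # pierwszy proces nie oczekuje na wykonanie, lecz przetwarza
--             # się od razu.
--             waiting_time.append(0)
--         else:
--
--             # Pozostałe czasy oczekiwania są równe różnicy czasu przetwarzania cyklu procesu
--             # i czasu wykonywania procesu.
--             waiting_time.append(turn_around_time[element] - test_data[element][1])
--
--         # Dodawanie wszystkich typów czasów do jednej listy.
--         # 1. indeks: czasy przybycia procesów,
--         # 2. indeks: czasy wykonywania procesów,
--         # 3. indeks: czasy wyjścia procesów,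
--         # 4. indeks: czasy cykli przetwarzania procesów,
--         # 5. indeks: czasy oczekiwania procesów.
--         times.append([test_data[element][0], test_data[element][1],
--                       exit_time[element], turn_around_time[element],
--                       waiting_time[element]])
--
--     return times
-- ===== SOURCE B (Python) =====
-- def create_list_of_times(list_of_data):
--     if not list_of_data:
--         return []
--     start = list_of_data[0][0]
--     prefix = [0]
--     for row in list_of_data:
--         prefix.append(prefix[-1] + row[1])
--     return [[row[0], row[1], start + p, start + p - row[0],
--              start + p - row[0] - row[1]]
--             for row, p in zip(list_of_data, prefix[1:])]
-- ===== Notes on version B (the rewrite author's own statement) =====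
-- stated objective: simpler
-- what changed: B replaces A's index loop with three parallel output lists, back-indexing and element==0 special cases by a prefix-sum pass over burst times followed by a single comprehension that builds each row from a closed form (exit = first arrival + prefix sum).
import Mathlib
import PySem

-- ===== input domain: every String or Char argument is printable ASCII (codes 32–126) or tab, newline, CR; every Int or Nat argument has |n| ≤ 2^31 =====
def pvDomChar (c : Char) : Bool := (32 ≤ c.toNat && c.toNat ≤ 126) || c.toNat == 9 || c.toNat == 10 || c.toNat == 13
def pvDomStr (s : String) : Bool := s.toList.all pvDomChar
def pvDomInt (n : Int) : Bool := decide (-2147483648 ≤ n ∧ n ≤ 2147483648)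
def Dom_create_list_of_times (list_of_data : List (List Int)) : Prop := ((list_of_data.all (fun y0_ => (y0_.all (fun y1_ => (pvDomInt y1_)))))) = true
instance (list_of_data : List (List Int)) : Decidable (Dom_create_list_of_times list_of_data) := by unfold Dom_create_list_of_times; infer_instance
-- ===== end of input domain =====

-- B replaces A's index loop over three parallel result lists (with back-indexing
-- and element==0 special cases) by a prefix-sum pass plus one comprehension
-- building each row from a closed form (objective: simpler). Not claimed faster.

-- ===== PORT A =====
-- A's loop body (one iteration of `for element in range(len(test_data))`);
-- inside Pre_ every pyGetD index is in range, so the defaults are never reached.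
def pvStepA (test_data : List (List Int))
    (s : List Int × List Int × List Int × List (List Int)) (element : Int) :
    List Int × List Int × List Int × List (List Int) :=
  let exit_time := s.1
  let turn_around_time := s.2.1
  let waiting_time := s.2.2.1
  let times := s.2.2.2
  let exit_time :=
    if element = 0 then
      exit_time ++ [PySem.List.pyGetD (PySem.List.pyGetD test_data element []) 0 0 +
                    PySem.List.pyGetD (PySem.List.pyGetD test_data element []) 1 0]
    else
      exit_time ++ [PySem.List.pyGetD exit_time (element - 1) 0 +
                    PySem.List.pyGetD (PySem.List.pyGetD test_data element []) 1 0]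
  let turn_around_time := turn_around_time ++
    [PySem.List.pyGetD exit_time element 0 -
     PySem.List.pyGetD (PySem.List.pyGetD test_data element []) 0 0]
  let waiting_time :=
    if element = 0 then waiting_time ++ [0]
    else waiting_time ++
      [PySem.List.pyGetD turn_around_time element 0 -
       PySem.List.pyGetD (PySem.List.pyGetD test_data element []) 1 0]
  let times := times ++
    [[PySem.List.pyGetD (PySem.List.pyGetD test_data element []) 0 0,
      PySem.List.pyGetD (PySem.List.pyGetD test_data element []) 1 0,
      PySem.List.pyGetD exit_time element 0,
      PySem.List.pyGetD turn_around_time element 0,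
      PySem.List.pyGetD waiting_time element 0]]
  (exit_time, turn_around_time, waiting_time, times)

def create_list_of_times (list_of_data : List (List Int)) : List (List Int) :=
  let test_data := list_of_data
  let st := (PySem.List.pyRange 0 (test_data.length : Int) 1).foldl
    (pvStepA test_data) ([], [], [], [])
  st.2.2.2

-- ===== PORT B =====
def create_list_of_times_alt (list_of_data : List (List Int)) : List (List Int) :=
  match list_of_data with
  | [] => []
  | first :: _ =>
    let start := PySem.List.pyGetD first 0 0
    let prefix_ := list_of_data.foldl
      (fun acc row => acc ++ [PySem.List.pyGetD acc (-1) 0 + PySem.List.pyGetD row 1 0])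
      [(0 : Int)]
    (list_of_data.zip (PySem.List.slice prefix_ (some 1) none)).map
      (fun rp =>
        [PySem.List.pyGetD rp.1 0 0, PySem.List.pyGetD rp.1 1 0,
         start + rp.2,
         start + rp.2 - PySem.List.pyGetD rp.1 0 0,
         start + rp.2 - PySem.List.pyGetD rp.1 0 0 - PySem.List.pyGetD rp.1 1 0])

-- ===== PRECONDITION & SPEC =====
-- Pre_ excludes exactly the inputs containing a row with fewer than 2 entries:
-- on those Python A raises IndexError (and Python B does too).
def Pre_create_list_of_times (list_of_data : List (List Int)) : Prop :=
  ∀ row ∈ list_of_data, 2 ≤ row.length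
instance (list_of_data : List (List Int)) : Decidable (Pre_create_list_of_times list_of_data) := by
  unfold Pre_create_list_of_times; infer_instance

def pvWitness_create_list_of_times : List (List Int) := [[0, 3], [2, 5], [4, 1]]

def Spec_create_list_of_times (list_of_data : List (List Int)) (out : List (List Int)) : Prop := out = create_list_of_times_alt list_of_data
instance (list_of_data : List (List Int)) (out : List (List Int)) : Decidable (Spec_create_list_of_times list_of_data out) := by unfold Spec_create_list_of_times; infer_instance

-- ===== CLAIM (what is proved, stated in full; the proofs are below) =====
def Claim_equal_create_list_of_times : Prop := ∀ (list_of_data : List (List Int)), Dom_create_list_of_times list_of_data → Pre_create_list_of_times list_of_data → Spec_create_list_of_times list_of_data (create_list_of_times list_of_data)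

-- ===== LEMMAS AND PROOFS =====

-- arrival / burst of a row
def pvArr (r : List Int) : Int := PySem.List.pyGetD r 0 0
def pvBur (r : List Int) : Int := PySem.List.pyGetD r 1 0

-- running exit / turn-around / waiting times and rows, from cumulative value c
def pvExits (c : Int) : List (List Int) → List Int
  | [] => []
  | r :: rs => (c + pvBur r) :: pvExits (c + pvBur r) rs

def pvTurns (c : Int) : List (List Int) → List Int
  | [] => []
  | r :: rs => (c + pvBur r - pvArr r) :: pvTurns (c + pvBur r) rs

def pvWaits (c : Int) : List (List Int) → List Int
  | [] => []
  | r :: rs => (c + pvBur r - pvArr r - pvBur r) :: pvWaits (c + pvBur r) rs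

def pvRows (c : Int) : List (List Int) → List (List Int)
  | [] => []
  | r :: rs =>
    [pvArr r, pvBur r, c + pvBur r, c + pvBur r - pvArr r,
     c + pvBur r - pvArr r - pvBur r] :: pvRows (c + pvBur r) rs

def pvCsum (c : Int) (xs : List (List Int)) : Int := c + (xs.map pvBur).sum

lemma pvExits_length (c : Int) (xs : List (List Int)) : (pvExits c xs).length = xs.length := by
  induction xs generalizing c with
  | nil => simp [pvExits]
  | cons r rs ih => simp [pvExits, ih]

lemma pvTurns_length (c : Int) (xs : List (List Int)) : (pvTurns c xs).length = xs.length := by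
  induction xs generalizing c with
  | nil => simp [pvTurns]
  | cons r rs ih => simp [pvTurns, ih]

lemma pvWaits_length (c : Int) (xs : List (List Int)) : (pvWaits c xs).length = xs.length := by
  induction xs generalizing c with
  | nil => simp [pvWaits]
  | cons r rs ih => simp [pvWaits, ih]

lemma pvCsum_cons (c : Int) (r : List Int) (rs : List (List Int)) :
    pvCsum (c + pvBur r) rs = pvCsum c (r :: rs) := by
  simp [pvCsum]; ring

lemma pvExits_append (c : Int) (xs : List (List Int)) (x : List Int) :
    pvExits c (xs ++ [x]) = pvExits c xs ++ [pvCsum c xs + pvBur x] := by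
  induction xs generalizing c with
  | nil => simp [pvExits, pvCsum]
  | cons r rs ih => simp [pvExits, ih, pvCsum_cons]

lemma pvTurns_append (c : Int) (xs : List (List Int)) (x : List Int) :
    pvTurns c (xs ++ [x]) = pvTurns c xs ++ [pvCsum c xs + pvBur x - pvArr x] := by
  induction xs generalizing c with
  | nil => simp [pvTurns, pvCsum]
  | cons r rs ih => simp [pvTurns, ih, pvCsum_cons]

lemma pvWaits_append (c : Int) (xs : List (List Int)) (x : List Int) :
    pvWaits c (xs ++ [x]) = pvWaits c xs ++ [pvCsum c xs + pvBur x - pvArr x - pvBur x] := by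
  induction xs generalizing c with
  | nil => simp [pvWaits, pvCsum]
  | cons r rs ih => simp [pvWaits, ih, pvCsum_cons]

lemma pvRows_append (c : Int) (xs : List (List Int)) (x : List Int) :
    pvRows c (xs ++ [x]) = pvRows c xs ++
      [[pvArr x, pvBur x, pvCsum c xs + pvBur x, pvCsum c xs + pvBur x - pvArr x,
        pvCsum c xs + pvBur x - pvArr x - pvBur x]] := by
  induction xs generalizing c with
  | nil => simp [pvRows, pvCsum]
  | cons r rs ih => simp [pvRows, ih, pvCsum_cons]

lemma pyGetD_append_len {α : Type} (l : List α) (v d : α) {k : Nat} (hl : l.length = k) :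
    PySem.List.pyGetD (l ++ [v]) ((k : Int)) d = v := by
  subst hl
  rw [PySem.List.pyGetD_natCast]
  simp [List.getD]

lemma pyGetD_append_left {α : Type} (l l' : List α) (i : Int) (d : α)
    (h0 : 0 ≤ i) (h : i < (l.length : Int)) :
    PySem.List.pyGetD (l ++ l') i d = PySem.List.pyGetD l i d := by
  obtain ⟨k, rfl⟩ : ∃ k : Nat, i = (k : Int) := ⟨i.toNat, (Int.toNat_of_nonneg h0).symm⟩
  have hk : k < l.length := by exact_mod_cast h
  rw [PySem.List.pyGetD_natCast, PySem.List.pyGetD_natCast]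
  simp [List.getD, List.getElem?_append_left hk]

lemma pvExits_eq_append (c : Int) (xs : List (List Int)) (h : xs ≠ []) :
    ∃ l, pvExits c xs = l ++ [pvCsum c xs] := by
  induction xs generalizing c with
  | nil => exact absurd rfl h
  | cons r rs ih =>
    cases rs with
    | nil => exact ⟨[], by simp [pvExits, pvCsum]⟩
    | cons r2 rs2 =>
      obtain ⟨l, hl⟩ := ih (c := c + pvBur r) (by simp)
      refine ⟨(c + pvBur r) :: l, ?_⟩
      have hstep : pvExits c (r :: r2 :: rs2) =
          (c + pvBur r) :: pvExits (c + pvBur r) (r2 :: rs2) := rfl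
      rw [hstep, hl, pvCsum_cons]
      simp

lemma pvExits_last (c : Int) (xs : List (List Int)) (h : xs ≠ []) :
    PySem.List.pyGetD (pvExits c xs) ((xs.length : Int) - 1) 0 = pvCsum c xs := by
  obtain ⟨l, hl⟩ := pvExits_eq_append c xs h
  have hlen : xs.length = l.length + 1 := by
    have h1 := pvExits_length c xs
    rw [hl] at h1
    simpa using h1.symm
  have hidx : ((xs.length : Int) - 1) = ((l.length : Nat) : Int) := by
    rw [hlen]; push_cast; ring
  rw [hl, hidx, pyGetD_append_len l _ 0 rfl]

-- A's fold over range(len(data)) computes exactly the four closed-form lists.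
lemma A_inv (data : List (List Int)) :
    (PySem.List.pyRange 0 (data.length : Int) 1).foldl (pvStepA data) ([], [], [], []) =
      (pvExits (pvArr data.headI) data, pvTurns (pvArr data.headI) data,
       pvWaits (pvArr data.headI) data, pvRows (pvArr data.headI) data) := by
  induction data using List.reverseRecOn with
  | nil => simp [pvExits, pvTurns, pvWaits, pvRows, PySem.List.pyRange_one_eq_nil le_rfl]
  | append_singleton ys y ih =>
    by_cases hys : ys = []
    · subst hys
      rw [show (((List.nil ++ [y] : List (List Int)).length : Int)) = (0 : Int) + 1 by simp,
          PySem.List.pyRange_one_singleton]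
      simp only [List.nil_append, List.foldl_cons, List.foldl_nil, pvStepA,
        List.headI, pvExits, pvTurns, pvWaits, pvRows]
      simp [PySem.List.pyGetD_zero_cons, pvArr, pvBur]
    · have hpos : 0 < ys.length := List.length_pos_iff.mpr hys
      have hlen : (((ys ++ [y]).length : Int)) = (ys.length : Int) + 1 := by
        simp
      rw [hlen, PySem.List.pyRange_one_succ_right (by exact_mod_cast Nat.zero_le _),
          List.foldl_append]
      have hcong : (PySem.List.pyRange 0 (ys.length : Int) 1).foldl
            (pvStepA (ys ++ [y])) ([], [], [], []) =
          (PySem.List.pyRange 0 (ys.length : Int) 1).foldl (pvStepA ys) ([], [], [], []) := by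
        apply PySem.List.foldl_congr_mem
        intro acc i hi
        obtain ⟨h0, h1⟩ := (PySem.List.mem_pyRange_one).1 hi
        unfold pvStepA
        rw [pyGetD_append_left ys [y] i [] h0 h1]
      rw [hcong, ih]
      have hhead : (ys ++ [y]).headI = ys.headI := by
        cases ys with
        | nil => exact absurd rfl hys
        | cons a l => simp
      rw [hhead]
      have hn0 : ((ys.length : Int)) ≠ 0 := by exact_mod_cast Nat.pos_iff_ne_zero.mp hpos
      simp only [List.foldl_cons, List.foldl_nil, pvStepA, if_neg hn0]
      rw [pyGetD_append_len ys y ([] : List Int) rfl,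
          pvExits_last (pvArr ys.headI) ys hys,
          pyGetD_append_len _ _ 0 (pvExits_length (pvArr ys.headI) ys),
          pyGetD_append_len _ _ 0 (pvTurns_length (pvArr ys.headI) ys),
          pyGetD_append_len _ _ 0 (pvWaits_length (pvArr ys.headI) ys),
          pvExits_append, pvTurns_append, pvWaits_append, pvRows_append]
      simp [pvArr, pvBur]

-- B's prefix-building fold appends the running exit times after the seed.
lemma B_prefix (rows : List (List Int)) : ∀ (acc : List Int) (c : Int),
    rows.foldl (fun acc row => acc ++
        [PySem.List.pyGetD acc (-1) 0 + PySem.List.pyGetD row 1 0]) (acc ++ [c])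
      = (acc ++ [c]) ++ pvExits c rows := by
  induction rows with
  | nil => intro acc c; simp [pvExits]
  | cons r rs ih =>
    intro acc c
    simp only [List.foldl_cons]
    rw [PySem.List.pyGetD_neg_one_append_singleton, ih (acc ++ [c]) (c + PySem.List.pyGetD r 1 0)]
    simp [pvExits, pvBur, List.append_assoc]

-- B's zip + comprehension over the exit times is the closed-form row list.
lemma B_zipmap (rows : List (List Int)) : ∀ (c s : Int),
    (rows.zip (pvExits c rows)).map (fun rp =>
        [PySem.List.pyGetD rp.1 0 0, PySem.List.pyGetD rp.1 1 0, s + rp.2,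
         s + rp.2 - PySem.List.pyGetD rp.1 0 0,
         s + rp.2 - PySem.List.pyGetD rp.1 0 0 - PySem.List.pyGetD rp.1 1 0])
      = pvRows (s + c) rows := by
  induction rows with
  | nil => intro c s; simp [pvRows]
  | cons r rs ih =>
    intro c s
    simp only [pvExits, List.zip_cons_cons, List.map_cons]
    rw [ih (c + pvBur r) s]
    simp only [pvRows, pvArr, pvBur]
    rw [← add_assoc]

-- ===== VERDICT (by name: the statement is the Claim_ definition above) =====
theorem create_list_of_times_spec : Claim_equal_create_list_of_times := by
  intro data _ _
  show create_list_of_times data = create_list_of_times_alt data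
  cases data with
  | nil => decide
  | cons first rest =>
    have hA : create_list_of_times (first :: rest) = pvRows (pvArr first) (first :: rest) := by
      simp only [create_list_of_times]
      rw [A_inv (first :: rest)]
      simp [List.headI]
    have hB : create_list_of_times_alt (first :: rest) = pvRows (pvArr first) (first :: rest) := by
      simp only [create_list_of_times_alt]
      rw [show [(0 : Int)] = ([] : List Int) ++ [(0 : Int)] from rfl,
          B_prefix (first :: rest) [] 0, PySem.List.slice_from_one]
      simp only [List.nil_append, List.cons_append, List.tail_cons]
      rw [B_zipmap (first :: rest) 0 (PySem.List.pyGetD first 0 0)]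
      simp [pvArr]
    rw [hA, hB]
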